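-- pv_equiv track=rewrite | github.com/ZhenhaoHuang-DUT/Density-Analysis-of-Nitrogen-Containing-Molecules | Data_Integration/Nitrogen-containing-Molecules-to-Database.py | find_density_column
-- ===== SOURCE A (Python) =====
-- def find_density_column(columns):
--     """Return the first column name that likely refers to density (case-insensitive)."""
--     for col in columns:
--         if 'density' in col.lower():
--             return col
--     # fallback: look for unit-like substrings
--     for col in columns:
--         if 'g' in col.lower() and 'cm' in col.lower():
--             return col
--     return None
-- ===== SOURCE B (Python) =====
-- def find_density_column(columns):
--     """Return the first column name that likely refers to density (case-insensitive)."""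
--     fallback = None
--     for col in columns:
--         low = col.lower()
--         if 'density' in low:
--             return col
--         if fallback is None and 'g' in low and 'cm' in low:
--             fallback = col
--     return fallback
-- ===== Notes on version B (the rewrite author's own statement) =====
-- stated objective: alternative
-- what changed: Replaces A's two priority-ordered passes (density first, then g/cm units) with a single pass that returns on a density match and records the first g/cm column as a fallback.
import Mathlib
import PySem

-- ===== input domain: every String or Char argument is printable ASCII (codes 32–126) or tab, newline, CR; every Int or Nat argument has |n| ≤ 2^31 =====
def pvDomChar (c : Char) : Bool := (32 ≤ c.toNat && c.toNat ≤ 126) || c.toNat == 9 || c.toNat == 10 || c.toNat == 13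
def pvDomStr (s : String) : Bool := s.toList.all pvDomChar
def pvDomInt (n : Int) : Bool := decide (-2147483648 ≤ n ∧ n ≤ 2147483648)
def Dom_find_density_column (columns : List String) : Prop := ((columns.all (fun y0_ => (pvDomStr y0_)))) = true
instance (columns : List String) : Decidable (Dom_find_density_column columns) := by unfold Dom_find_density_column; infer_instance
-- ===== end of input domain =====

-- ===== PORT A =====
-- B changes: one pass with a recorded fallback candidate instead of A's two priority-ordered passes.
-- first loop of A: return the first column whose lowercase contains 'density'
def fdcLoop1 : List String → Option String
  | [] => none
  | col :: rest =>
    if PySem.Str.isIn "density" (PySem.Str.lower col) then some col else fdcLoop1 rest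

-- second loop of A: return the first column whose lowercase contains both 'g' and 'cm'
def fdcLoop2 : List String → Option String
  | [] => none
  | col :: rest =>
    if PySem.Str.isIn "g" (PySem.Str.lower col) && PySem.Str.isIn "cm" (PySem.Str.lower col)
      then some col else fdcLoop2 rest

def find_density_column (columns : List String) : Option String :=
  match fdcLoop1 columns with
  | some col => some col
  | none =>
    match fdcLoop2 columns with
    | some col => some col
    | none => none

-- ===== PORT B =====
-- single pass, carrying the fallback candidate (first g/cm column seen so far)
def fdcAltLoop : List String → Option String → Option String
  | [], fallback => fallback
  | col :: rest, fallback =>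
    let low := PySem.Str.lower col
    if PySem.Str.isIn "density" low then some col
    else fdcAltLoop rest
      (if fallback.isNone && PySem.Str.isIn "g" low && PySem.Str.isIn "cm" low
        then some col else fallback)

def find_density_column_alt (columns : List String) : Option String :=
  fdcAltLoop columns none

-- ===== PRECONDITION & SPEC =====
def Spec_find_density_column (columns : List String) (out : Option String) : Prop := out = find_density_column_alt columns
instance (columns : List String) (out : Option String) : Decidable (Spec_find_density_column columns out) := by unfold Spec_find_density_column; infer_instance

-- ===== CLAIM (what is proved, stated in full; the proofs are below) =====
def Claim_equal_find_density_column : Prop := ∀ (columns : List String), Dom_find_density_column columns → Spec_find_density_column columns (find_density_column columns)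

-- ===== LEMMAS AND PROOFS =====
lemma fdcAltLoop_eq (cols : List String) (fb : Option String) :
    fdcAltLoop cols fb =
      match fdcLoop1 cols with
      | some c => some c
      | none => match fb with
        | some f => some f
        | none => fdcLoop2 cols := by
  induction cols generalizing fb with
  | nil => cases fb <;> rfl
  | cons col rest ih =>
    by_cases hd : PySem.Str.isIn "density" (PySem.Str.lower col) = true
    · simp only [fdcAltLoop, fdcLoop1, if_pos hd]
    · simp only [fdcAltLoop, fdcLoop1, fdcLoop2, if_neg hd, ih]
      cases fb with
      | some f =>
        simp only [Option.isNone_some, Bool.false_and, Bool.false_eq_true, if_false]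
      | none =>
        simp only [Option.isNone_none, Bool.true_and]
        cases fdcLoop1 rest with
        | some c => rfl
        | none =>
          by_cases hg : (PySem.Str.isIn "g" (PySem.Str.lower col) &&
              PySem.Str.isIn "cm" (PySem.Str.lower col)) = true
          · rw [if_pos hg, if_pos hg]
          · rw [if_neg hg, if_neg hg]

-- ===== VERDICT (by name: the statement is the Claim_ definition above) =====
theorem find_density_column_spec : Claim_equal_find_density_column := by
  intro columns _
  unfold Spec_find_density_column find_density_column find_density_column_alt
  rw [fdcAltLoop_eq]
  cases fdcLoop1 columns with
  | some c => rfl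
  | none => cases fdcLoop2 columns <;> rfl
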